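-- pv_equiv track=rewrite | github.com/MrBrantCode/unitest_baseline | mut_generate/mist_train_taco/taco_15684/solution.py | maximized_minimum_height
-- ===== SOURCE A (Python) =====
-- def maximized_minimum_height(arr, m):
--     def can_achieve_height(height):
--         blocks_needed = 0
--         for column_height in arr:
--             if column_height < height:
--                 blocks_needed += height - column_height
--         return blocks_needed <= m
--
--     low = min(arr)
--     high = max(arr) + m
--     result = low
--
--     while low <= high:
--         mid = (low + high) // 2
--         if can_achieve_height(mid):
--             result = mid
--             low = mid + 1
--         else:
--             high = mid - 1
--
--     return result
-- ===== SOURCE B (Python) =====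
-- def maximized_minimum_height(arr, m):
--     s = sorted(arr)
--     n = len(s)
--     best = s[0]
--     pref = 0
--     for i in range(n):
--         x = s[i]
--         pref += x
--         cand = (pref + m) // (i + 1)
--         if x <= cand and (i + 1 == n or cand <= s[i + 1]):
--             if cand > best:
--                 best = cand
--     return best
-- ===== Notes on version B (the rewrite author's own statement) =====
-- stated objective: alternative
-- what changed: Replaced the binary search over heights (each step rescanning the whole array) by a single pass over the sorted array with a running prefix sum that computes the best feasible level directly; it trades the log(max+m) search factor for an O(n log n) sort.
import Mathlib
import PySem

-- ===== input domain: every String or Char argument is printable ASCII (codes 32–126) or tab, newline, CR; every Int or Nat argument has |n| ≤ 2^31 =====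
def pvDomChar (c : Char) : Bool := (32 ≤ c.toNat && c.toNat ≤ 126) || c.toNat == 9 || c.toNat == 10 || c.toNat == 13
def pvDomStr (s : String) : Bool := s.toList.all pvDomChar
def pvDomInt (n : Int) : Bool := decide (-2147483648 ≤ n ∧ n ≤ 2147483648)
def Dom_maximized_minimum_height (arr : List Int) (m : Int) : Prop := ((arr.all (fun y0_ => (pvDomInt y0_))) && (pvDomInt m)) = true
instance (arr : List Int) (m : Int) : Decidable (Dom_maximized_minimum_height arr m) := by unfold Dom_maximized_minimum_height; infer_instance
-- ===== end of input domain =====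

-- B replaces A's binary search over heights by one pass over the sorted array with prefix sums (an alternative algorithm of comparable cost).

-- ===== PORT A =====
def pvCanAchieve (arr : List Int) (m height : Int) : Bool :=
  decide ((arr.foldl (fun acc x => if x < height then acc + (height - x) else acc) 0) ≤ m)

def pvLoopA (arr : List Int) (m : Int) (low high result : Int) : Int :=
  if _h : low ≤ high then
    let mid := PySem.Int.floordiv (low + high) 2
    if pvCanAchieve arr m mid then pvLoopA arr m (mid + 1) high mid
    else pvLoopA arr m low (mid - 1) result
  else result
termination_by (high + 1 - low).toNat
decreasing_by
  · have := PySem.Int.floordiv_two_mid_bounds _h; omega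
  · have := PySem.Int.floordiv_two_mid_bounds _h; omega

def maximized_minimum_height (arr : List Int) (m : Int) : Int :=
  let low := (PySem.List.min? arr (fun x => x)).getD 0   -- min(arr); raises on [] (excluded by Pre_)
  let high := (PySem.List.max? arr (fun x => x)).getD 0 + m
  pvLoopA arr m low high low

-- ===== PORT B =====
-- the lookahead test 'i + 1 == n or cand <= s[i + 1]' of Source B: true iff nothing follows or cand ≤ next
def pvLook (cand : Int) : List Int → Bool
  | [] => true
  | y :: _ => decide (cand ≤ y)

def pvGoB (m : Int) (rest : List Int) (pref k best : Int) : Int :=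
  match rest with
  | [] => best
  | x :: rest' =>
    let pref' := pref + x
    let k' := k + 1
    let cand := PySem.Int.floordiv (pref' + m) k'
    let pass := decide (x ≤ cand) && pvLook cand rest'
    let best' := if pass then (if cand > best then cand else best) else best
    pvGoB m rest' pref' k' best'

def maximized_minimum_height_alt (arr : List Int) (m : Int) : Int :=
  let s := PySem.List.sorted arr (fun x => x) false
  match s with
  | [] => 0      -- s[0] raises on [] (excluded by Pre_)
  | x :: rest => pvGoB m (x :: rest) 0 0 x

-- ===== PRECONDITION & SPEC =====
-- Pre_ excludes only the empty list, on which A raises ValueError (min of empty sequence).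
def Pre_maximized_minimum_height (arr : List Int) (m : Int) : Prop := arr ≠ []
instance (arr : List Int) (m : Int) : Decidable (Pre_maximized_minimum_height arr m) := by unfold Pre_maximized_minimum_height; infer_instance
def pvWitness_maximized_minimum_height : List Int × Int := ([3, 1, 2], 4)

def Spec_maximized_minimum_height (arr : List Int) (m : Int) (out : Int) : Prop := out = maximized_minimum_height_alt arr m
instance (arr : List Int) (m : Int) (out : Int) : Decidable (Spec_maximized_minimum_height arr m out) := by unfold Spec_maximized_minimum_height; infer_instance

-- ===== CLAIM (what is proved, stated in full; the proofs are below) =====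
def Claim_equal_maximized_minimum_height : Prop := ∀ (arr : List Int) (m : Int), Dom_maximized_minimum_height arr m → Pre_maximized_minimum_height arr m → Spec_maximized_minimum_height arr m (maximized_minimum_height arr m)

-- ===== LEMMAS AND PROOFS =====

-- cost of raising every column of arr to height h (the blocks A's can_achieve_height counts)
def pvCost (arr : List Int) (h : Int) : Int := (arr.map (fun x => max (h - x) 0)).sum
-- feasibility predicate: the level h is achievable with at most m blocks
def pvP (arr : List Int) (m h : Int) : Prop := pvCost arr h ≤ m

theorem pvCost_foldl (arr : List Int) (h : Int) : ∀ acc : Int,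
    arr.foldl (fun acc x => if x < h then acc + (h - x) else acc) acc = acc + pvCost arr h := by
  induction arr with
  | nil => intro acc; simp [pvCost]
  | cons a t ih =>
    intro acc
    simp only [List.foldl, ih, pvCost, List.map, List.sum_cons]
    split_ifs <;> omega

theorem pvCanAchieve_iff (arr : List Int) (m h : Int) :
    pvCanAchieve arr m h = true ↔ pvP arr m h := by
  simp [pvCanAchieve, pvCost_foldl, pvP]

theorem pvCost_nonneg (arr : List Int) (h : Int) : 0 ≤ pvCost arr h := by
  induction arr with
  | nil => simp [pvCost]
  | cons a t ih => simp only [pvCost, List.map, List.sum_cons] at *; omega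

theorem pvCost_mono (arr : List Int) {h1 h2 : Int} (hh : h1 ≤ h2) :
    pvCost arr h1 ≤ pvCost arr h2 := by
  induction arr with
  | nil => simp [pvCost]
  | cons a t ih => simp only [pvCost, List.map, List.sum_cons] at *; omega

theorem pvCost_append (u v : List Int) (h : Int) :
    pvCost (u ++ v) h = pvCost u h + pvCost v h := by
  simp [pvCost]

theorem pvCost_perm {arr s : List Int} (hp : arr.Perm s) (h : Int) :
    pvCost arr h = pvCost s h := by
  exact List.Perm.sum_eq (hp.map _)

theorem pvCost_eq_zero {arr : List Int} {h : Int} (hall : ∀ x ∈ arr, h ≤ x) :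
    pvCost arr h = 0 := by
  induction arr with
  | nil => simp [pvCost]
  | cons a t ih =>
    have ha := hall a (by simp)
    have := ih (fun x hx => hall x (by simp [hx]))
    simp only [pvCost, List.map, List.sum_cons] at *
    omega

theorem pvCost_eq_linear {arr : List Int} {h : Int} (hall : ∀ x ∈ arr, x ≤ h) :
    pvCost arr h = arr.length * h - arr.sum := by
  induction arr with
  | nil => simp [pvCost]
  | cons a t ih =>
    have ha := hall a (by simp)
    have := ih (fun x hx => hall x (by simp [hx]))
    simp only [pvCost, List.map, List.sum_cons, List.length_cons] at *
    push_cast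
    have hr : ((t.length : Int) + 1) * h = (t.length : Int) * h + h := by ring
    omega

theorem pvCost_lb {arr : List Int} {x : Int} (hx : x ∈ arr) (h : Int) :
    h - x ≤ pvCost arr h := by
  induction arr with
  | nil => simp at hx
  | cons a t ih =>
    rcases List.mem_cons.mp hx with rfl | hx'
    · have := pvCost_nonneg t h
      simp only [pvCost, List.map, List.sum_cons] at *; omega
    · have := ih hx'
      simp only [pvCost, List.map, List.sum_cons] at *; omega

-- characterization of the result value
def pvC (arr : List Int) (m lo r : Int) : Prop :=
  (pvP arr m r ∧ ∀ h, pvP arr m h → h ≤ r) ∨ (m < 0 ∧ r = lo)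

theorem pvLoopA_correct (arr : List Int) (m lo : Int) (low high result : Int)
    (h1 : pvP arr m result ∨ (m < 0 ∧ result = lo))
    (h2 : ∀ h, pvP arr m h → h < low ∨ h ≤ high)
    (h3 : ∀ h, pvP arr m h → h < low → h ≤ result) :
    pvC arr m lo (pvLoopA arr m low high result) := by
  rw [pvLoopA]
  split
  · rename_i hle
    have hmid := PySem.Int.floordiv_two_mid_bounds hle
    by_cases hcan : pvCanAchieve arr m (PySem.Int.floordiv (low + high) 2) = true
    · simp only [hcan, if_true]
      refine pvLoopA_correct arr m lo _ _ _ (Or.inl ((pvCanAchieve_iff arr m _).mp hcan)) ?_ ?_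
      · intro h hP
        rcases h2 h hP with h' | h'
        · left; omega
        · right; exact h'
      · intro h _ hlt; omega
    · simp only [hcan, if_false]
      have hnot : ¬ pvP arr m (PySem.Int.floordiv (low + high) 2) := by
        intro hP; exact hcan ((pvCanAchieve_iff arr m _).mpr hP)
      refine pvLoopA_correct arr m lo _ _ _ h1 ?_ h3
      intro h hP
      rcases h2 h hP with h' | h'
      · left; exact h'
      · by_cases hge : PySem.Int.floordiv (low + high) 2 ≤ h
        · exact absurd (le_trans (pvCost_mono arr hge) hP) hnot
        · right; omega
  · rename_i hle
    rcases h1 with hP | hneg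
    · left
      refine ⟨hP, fun h hh => h3 h hh ?_⟩
      rcases h2 h hh with h' | h' <;> omega
    · right; exact hneg
termination_by (high + 1 - low).toNat
decreasing_by
  all_goals have := PySem.Int.floordiv_two_mid_bounds (show low ≤ high by assumption); omega

-- in a sorted list, the first countP(≤ L) elements are exactly those ≤ L
theorem pvSplit {L : Int} : ∀ {u v : List Int},
    ((u ++ v).Pairwise (· ≤ ·)) →
    (u.length = (u ++ v).countP (fun e => decide (e ≤ L))) →
    (∀ e ∈ u, e ≤ L) ∧ (∀ e ∈ v, L < e) := by
  intro u
  induction u with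
  | nil =>
    intro v hs hl
    refine ⟨by simp, fun e he => ?_⟩
    simp only [List.nil_append, List.length_nil] at hs hl
    have h0 : v.countP (fun e => decide (e ≤ L)) = 0 := hl.symm
    have := List.countP_eq_zero.mp h0 e he
    simp at this; omega
  | cons a u' ih =>
    intro v hs hl
    simp only [List.cons_append, List.pairwise_cons] at hs
    obtain ⟨ha, hs'⟩ := hs
    simp only [List.cons_append, List.countP_cons, List.length_cons] at hl
    have haL : a ≤ L := by
      by_contra hcon
      have h0 : (u' ++ v).countP (fun e => decide (e ≤ L)) = 0 := by
        apply List.countP_eq_zero.mpr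
        intro e he
        simp only [decide_eq_true_eq]
        intro heL
        exact hcon (le_trans (ha e he) heL)
      simp [hcon, h0] at hl
    have hl' : u'.length = (u' ++ v).countP (fun e => decide (e ≤ L)) := by
      simp only [haL, decide_true, if_true] at hl; omega
    obtain ⟨c1, c2⟩ := ih hs' hl'
    exact ⟨by
      intro e he
      rcases List.mem_cons.mp he with rfl | he'
      · exact haL
      · exact c1 e he', c2⟩

-- one-step unfolding of the scan (definitional)
theorem pvGoB_cons (m x pref k best : Int) (rest' : List Int) :
    pvGoB m (x :: rest') pref k best =
      pvGoB m rest' (pref + x) (k + 1)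
        (if (decide (x ≤ PySem.Int.floordiv (pref + x + m) (k + 1)) &&
            pvLook (PySem.Int.floordiv (pref + x + m) (k + 1)) rest')
         then (if PySem.Int.floordiv (pref + x + m) (k + 1) > best
               then PySem.Int.floordiv (pref + x + m) (k + 1) else best)
         else best) := rfl

-- m < 0: no candidate is ever accepted, best is returned unchanged
theorem pvGoB_neg (m : Int) (hm : m < 0) :
    ∀ (rest done : List Int) (best : Int),
      (done ++ rest).Pairwise (· ≤ ·) →
      pvGoB m rest done.sum (done.length : Int) best = best := by
  intro rest
  induction rest with
  | nil => intro done best _; simp [pvGoB]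
  | cons x rest' ih =>
    intro done best hs
    have hdx : ∀ e ∈ done, e ≤ x := by
      intro e he
      exact (List.pairwise_append.mp hs).2.2 e he x (by simp)
    have hsum : done.sum ≤ (done.length : Int) * x := by
      have := List.sum_le_card_nsmul done x hdx
      simpa [nsmul_eq_mul] using this
    have hklt : (0 : Int) < (done.length : Int) + 1 := by positivity
    have hcand : PySem.Int.floordiv (done.sum + x + m) ((done.length : Int) + 1) < x := by
      rw [PySem.Int.floordiv_lt_iff_lt_mul hklt]
      nlinarith
    have hd : decide (x ≤ PySem.Int.floordiv (done.sum + x + m) ((done.length : Int) + 1)) = false := by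
      simp only [decide_eq_false_iff_not, not_le]; exact hcand
    have hrec := ih (done ++ [x]) best (by simpa using hs)
    simp only [List.sum_append, List.length_append, List.sum_cons, List.sum_nil,
      List.length_cons, List.length_nil, Nat.cast_add, Nat.cast_one, Nat.cast_zero,
      add_zero, zero_add] at hrec
    rw [pvGoB_cons, hd]
    simpa using hrec

-- if the split point k' = countP(≤ L) is reached, the candidate there is exactly L and it passes
theorem pvKey (s : List Int) (hs : s.Pairwise (· ≤ ·)) (m L : Int)
    (hL : pvP s m L) (hL1 : ¬ pvP s m (L + 1))
    (done rest' : List Int) (x : Int) (he : s = (done ++ [x]) ++ rest')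
    (hk : done.length + 1 = s.countP (fun e => decide (e ≤ L))) :
    PySem.Int.floordiv (done.sum + x + m) ((done.length : Int) + 1) = L ∧
      x ≤ L ∧ (∀ y ∈ rest', L < y) := by
  have hk2 : (done ++ [x]).length = ((done ++ [x]) ++ rest').countP (fun e => decide (e ≤ L)) := by
    rw [← he, ← hk]; simp
  obtain ⟨hle, hgt⟩ := pvSplit (he ▸ hs) hk2
  have hxL : x ≤ L := hle x (by simp)
  have hsum : (done ++ [x]).sum = done.sum + x := by simp
  have hlen : ((done ++ [x]).length : Int) = (done.length : Int) + 1 := by simp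
  have hcostL : pvCost s L = ((done.length : Int) + 1) * L - (done.sum + x) := by
    rw [he, pvCost_append, pvCost_eq_linear hle,
      pvCost_eq_zero (fun e heh => le_of_lt (hgt e heh)), hsum, hlen]
    ring
  have hcostL1 : pvCost s (L + 1) = ((done.length : Int) + 1) * (L + 1) - (done.sum + x) := by
    rw [he, pvCost_append, pvCost_eq_linear (fun e heh => by have := hle e heh; omega),
      pvCost_eq_zero (fun e heh => by have := hgt e heh; omega), hsum, hlen]
    ring
  have h1 : pvCost s L ≤ m := hL
  have h2 : ¬ pvCost s (L + 1) ≤ m := hL1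
  have hklt : (0 : Int) < (done.length : Int) + 1 := by positivity
  refine ⟨?_, hxL, hgt⟩
  rw [PySem.Int.floordiv_eq_iff_of_pos hklt]
  constructor <;> nlinarith

-- main B-side lemma (m ≥ 0): soundness and completeness of the scan
theorem pvGoB_main (s : List Int) (hs : s.Pairwise (· ≤ ·)) (m : Int) (hm : 0 ≤ m)
    (L : Int) (hL : pvP s m L) (hL1 : ¬ pvP s m (L + 1)) :
    ∀ (rest done : List Int) (best : Int),
      s = done ++ rest →
      pvP s m best →
      (L ≤ best ∨ done.length < s.countP (fun e => decide (e ≤ L))) →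
      pvP s m (pvGoB m rest done.sum (done.length : Int) best) ∧
        L ≤ pvGoB m rest done.sum (done.length : Int) best := by
  intro rest
  induction rest with
  | nil =>
    intro done best he hbest hinv
    simp only [pvGoB]
    refine ⟨hbest, ?_⟩
    rcases hinv with h | h
    · exact h
    · exfalso
      have hcle := List.countP_le_length (p := fun e => decide (e ≤ L)) (l := s)
      have hlen : s.length = done.length := by rw [he]; simp
      omega
  | cons x rest' ih =>
    intro done best he hbest hinv
    have he' : s = (done ++ [x]) ++ rest' := by rw [he]; simp
    have hp := List.pairwise_append.mp (he' ▸ hs)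
    obtain ⟨hp1, hp2, hcross⟩ := hp
    have hdx : ∀ e ∈ done, e ≤ x :=
      fun e heh => (List.pairwise_append.mp hp1).2.2 e heh x (by simp)
    have hklt : (0 : Int) < (done.length : Int) + 1 := by positivity
    -- soundness: any passing candidate is feasible
    have hsound : ∀ hx : x ≤ PySem.Int.floordiv (done.sum + x + m) ((done.length : Int) + 1),
        (∀ y ∈ rest', PySem.Int.floordiv (done.sum + x + m) ((done.length : Int) + 1) ≤ y) →
        pvP s m (PySem.Int.floordiv (done.sum + x + m) ((done.length : Int) + 1)) := by
      intro hx hlook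
      set c := PySem.Int.floordiv (done.sum + x + m) ((done.length : Int) + 1) with hc
      have hle : ∀ e ∈ done ++ [x], e ≤ c := by
        intro e heh
        rcases List.mem_append.mp heh with h' | h'
        · exact le_trans (hdx e h') hx
        · simp at h'; omega
      have hcost : pvCost s c = ((done.length : Int) + 1) * c - (done.sum + x) := by
        rw [he', pvCost_append, pvCost_eq_linear hle, pvCost_eq_zero hlook]
        simp only [List.sum_append, List.sum_cons, List.sum_nil, List.length_append,
          List.length_cons, List.length_nil, Nat.cast_add, Nat.cast_one, Nat.cast_zero, add_zero]
        try ring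
      have hmul : c * ((done.length : Int) + 1) ≤ done.sum + x + m :=
        (PySem.Int.le_floordiv_iff_mul_le hklt).mp (le_refl c)
      unfold pvP
      rw [hcost]; nlinarith
    rw [pvGoB_cons]
    by_cases hpass : (decide (x ≤ PySem.Int.floordiv (done.sum + x + m) ((done.length : Int) + 1)) &&
        pvLook (PySem.Int.floordiv (done.sum + x + m) ((done.length : Int) + 1)) rest') = true
    · rw [if_pos hpass]
      obtain ⟨hx, hlook⟩ := (Bool.and_eq_true _ _).mp hpass
      have hx' : x ≤ PySem.Int.floordiv (done.sum + x + m) ((done.length : Int) + 1) := by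
        simpa using hx
      have hlook' : ∀ y ∈ rest', PySem.Int.floordiv (done.sum + x + m) ((done.length : Int) + 1) ≤ y := by
        intro y hy
        cases rest' with
        | nil => simp at hy
        | cons z t =>
          have hz : PySem.Int.floordiv (done.sum + x + m) ((done.length : Int) + 1) ≤ z := by
            simpa [pvLook] using hlook
          rcases List.mem_cons.mp hy with rfl | hy'
          · exact hz
          · exact le_trans hz ((List.pairwise_cons.mp hp2).1 y hy')
      have hPc := hsound hx' hlook'
      set c := PySem.Int.floordiv (done.sum + x + m) ((done.length : Int) + 1) with hc
      set best' := if c > best then c else best with hb'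
      have hPb' : pvP s m best' := by
        rw [hb']; split_ifs <;> assumption
      have hbb' : best ≤ best' := by rw [hb']; split_ifs <;> omega
      have hcb' : c ≤ best' := by rw [hb']; split_ifs <;> omega
      have hinv' : L ≤ best' ∨ (done ++ [x]).length < s.countP (fun e => decide (e ≤ L)) := by
        rcases hinv with h | h
        · left; omega
        · by_cases hkc : done.length + 1 = s.countP (fun e => decide (e ≤ L))
          · obtain ⟨hcL, _, _⟩ := pvKey s hs m L hL hL1 done rest' x he' hkc
            left; rw [← hc] at hcL; omega
          · right; simp only [List.length_append, List.length_cons, List.length_nil]; omega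
      have hrec := ih (done ++ [x]) best' he' hPb' hinv'
      simpa using hrec
    · rw [if_neg hpass]
      have hinv' : L ≤ best ∨ (done ++ [x]).length < s.countP (fun e => decide (e ≤ L)) := by
        rcases hinv with h | h
        · left; exact h
        · right
          by_cases hkc : done.length + 1 = s.countP (fun e => decide (e ≤ L))
          · exfalso
            obtain ⟨hcL, hxL, hgt⟩ := pvKey s hs m L hL hL1 done rest' x he' hkc
            apply hpass
            rw [Bool.and_eq_true _ _]
            constructor
            · simp only [decide_eq_true_eq]; omega
            · cases rest' with
              | nil => rfl
              | cons z t =>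
                simp only [pvLook, decide_eq_true_eq]
                have := hgt z (by simp)
                omega
          · simp only [List.length_append, List.length_cons, List.length_nil]; omega
      have hrec := ih (done ++ [x]) best he' hbest hinv'
      simpa using hrec

-- ===== VERDICT (by name: the statement is the Claim_ definition above) =====
theorem maximized_minimum_height_spec : Claim_equal_maximized_minimum_height := by
  unfold Claim_equal_maximized_minimum_height
  intro arr m _ hpre
  unfold Pre_maximized_minimum_height at hpre
  unfold Spec_maximized_minimum_height
  -- A side: min, max, and the binary-search characterization
  obtain ⟨lo, hlo⟩ : ∃ lo, PySem.List.min? arr (fun x => x) = some lo := by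
    cases h : PySem.List.min? arr (fun x => x) with
    | none => exact absurd ((PySem.List.min?_eq_none_iff _ _).mp h) hpre
    | some v => exact ⟨v, rfl⟩
  obtain ⟨hi, hhi⟩ : ∃ hi, PySem.List.max? arr (fun x => x) = some hi := by
    cases h : PySem.List.max? arr (fun x => x) with
    | none => exact absurd ((PySem.List.max?_eq_none_iff _ _).mp h) hpre
    | some v => exact ⟨v, rfl⟩
  have hlomin : ∀ y ∈ arr, lo ≤ y := PySem.List.min?_isMin hlo
  have hlomem : lo ∈ arr := PySem.List.min?_mem hlo
  have hhimax : ∀ y ∈ arr, y ≤ hi := PySem.List.max?_isMax hhi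
  have hhimem : hi ∈ arr := PySem.List.max?_mem hhi
  have hA : maximized_minimum_height arr m = pvLoopA arr m lo (hi + m) lo := by
    simp only [maximized_minimum_height, hlo, hhi, Option.getD_some]
  have hCA : pvC arr m lo (pvLoopA arr m lo (hi + m) lo) := by
    apply pvLoopA_correct
    · by_cases hm : m < 0
      · exact Or.inr ⟨hm, rfl⟩
      · left
        unfold pvP
        rw [pvCost_eq_zero hlomin]
        omega
    · intro h hP
      right
      have := pvCost_lb hhimem h
      unfold pvP at hP
      omega
    · intro h _ hlt; omega
  -- B side: the sorted list
  set s := PySem.List.sorted arr (fun x => x) false with hsdef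
  have hperm : s.Perm arr := PySem.List.sorted_perm arr (fun x => x) false
  have hpair : s.Pairwise (· ≤ ·) := by
    have := PySem.List.sorted_pairwise (xs := arr) (key := fun x => x)
    simpa using this
  have hsne : s ≠ [] := by
    rw [Ne, PySem.List.sorted_eq_nil_iff]; exact hpre
  obtain ⟨x0, t, hst⟩ := List.exists_cons_of_ne_nil hsne
  have hB : maximized_minimum_height_alt arr m = pvGoB m (x0 :: t) 0 0 x0 := by
    simp only [maximized_minimum_height_alt]
    rw [← hsdef, hst]
  have hx0min : ∀ e ∈ s, x0 ≤ e := by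
    intro e he
    rw [hst] at he hpair
    rcases List.mem_cons.mp he with rfl | he'
    · exact le_refl e
    · exact (List.pairwise_cons.mp hpair).1 e he'
  have hcost_eq : ∀ h, pvCost arr h = pvCost s h := fun h => pvCost_perm hperm.symm h
  have hx0arr : x0 ∈ arr := hperm.subset (by rw [hst]; simp)
  have hlos : lo ∈ s := hperm.symm.subset hlomem
  have hlox0 : lo = x0 := le_antisymm (hlomin x0 hx0arr) (hx0min lo hlos)
  rw [hA, hB]
  by_cases hm : m < 0
  · -- nothing is feasible: A returns min(arr), B's scan accepts nothing
    have hAval : pvLoopA arr m lo (hi + m) lo = lo := by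
      rcases hCA with ⟨hP, _⟩ | ⟨_, hv⟩
      · exact absurd (le_trans (pvCost_nonneg arr _) hP) (by omega)
      · exact hv
    have hBval : pvGoB m (x0 :: t) 0 0 x0 = x0 := by
      have := pvGoB_neg m hm (x0 :: t) [] x0 (by simpa [hst] using hpair)
      simpa using this
    rw [hAval, hBval, hlox0]
  · push_neg at hm
    rcases hCA with ⟨hPA, hmaxA⟩ | ⟨hm', _⟩
    · set L := pvLoopA arr m lo (hi + m) lo with hLdef
      have hLs : pvP s m L := by unfold pvP; rw [← hcost_eq]; exact hPA
      have hL1 : ¬ pvP s m (L + 1) := by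
        intro hP
        have : pvP arr m (L + 1) := by unfold pvP; rw [hcost_eq]; exact hP
        have := hmaxA _ this
        omega
      have hx0L : x0 ≤ L := by
        by_contra hcon
        push_neg at hcon
        apply hL1
        unfold pvP
        have h1 : pvCost s (L + 1) ≤ pvCost s x0 := pvCost_mono s (by omega)
        rw [pvCost_eq_zero hx0min] at h1
        omega
      have hPx0 : pvP s m x0 := by
        unfold pvP; rw [pvCost_eq_zero hx0min]; omega
      have hcount : 0 < s.countP (fun e => decide (e ≤ L)) := by
        rw [List.countP_pos_iff]
        exact ⟨x0, by rw [hst]; simp, by simpa using hx0L⟩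
      have hmain := pvGoB_main s hpair m hm L hLs hL1 (x0 :: t) [] x0
        (by rw [hst]; simp) hPx0 (Or.inr (by simpa using hcount))
      simp only [List.sum_nil, List.length_nil, Nat.cast_zero] at hmain
      obtain ⟨hPB, hLB⟩ := hmain
      have hBA : pvGoB m (x0 :: t) 0 0 x0 ≤ L := by
        apply hmaxA
        unfold pvP
        rw [hcost_eq]
        exact hPB
      omega
    · omega
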